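-- pv_equiv track=rewrite | github.com/oliverbeagley-pgg/aoc | aoc_2022/day08/part1.py | get_visible_trees
-- ===== SOURCE A (Python) =====
-- from collections.abc import Sequence
--
-- def get_visible_trees(stride: Sequence[int]) -> set[int]:
--     visible_trees = {
--         0,
--         len(stride) - 1,
--     }
--
--     current_max = stride[0]
--     for idx in range(1, len(stride)):
--         if stride[idx] > current_max:
--             visible_trees.add(idx)
--             current_max = stride[idx]
--
--     current_max = stride[-1]
--     for idx in range(len(stride) - 2, -1, -1):
--         if stride[idx] > current_max:
--             visible_trees.add(idx)
--             current_max = stride[idx]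
--
--     return visible_trees
-- ===== SOURCE B (Python) =====
-- def get_visible_trees(stride):
--     n = len(stride)
--     prefix = []  # prefix[i] = max of stride[:i], or None when i == 0
--     best = None
--     for x in stride:
--         prefix.append(best)
--         if best is None or x > best:
--             best = x
--     suffix = []  # suffix[i] = max of stride[i+1:], or None when i == n-1
--     best = None
--     for x in reversed(stride):
--         suffix.append(best)
--         if best is None or x > best:
--             best = x
--     suffix.reverse()
--     return {
--         i
--         for i in range(n)
--         if prefix[i] is None or stride[i] > prefix[i]
--         or suffix[i] is None or stride[i] > suffix[i]
--     }
-- ===== Notes on version B (the rewrite author's own statement) =====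
-- stated objective: alternative
-- what changed: Replaces A's two stateful scans that insert indices into one shared set while tracking a running maximum by precomputing prefix-max and suffix-max arrays and selecting the visible indices in a single comprehension over all positions.
import Mathlib
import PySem

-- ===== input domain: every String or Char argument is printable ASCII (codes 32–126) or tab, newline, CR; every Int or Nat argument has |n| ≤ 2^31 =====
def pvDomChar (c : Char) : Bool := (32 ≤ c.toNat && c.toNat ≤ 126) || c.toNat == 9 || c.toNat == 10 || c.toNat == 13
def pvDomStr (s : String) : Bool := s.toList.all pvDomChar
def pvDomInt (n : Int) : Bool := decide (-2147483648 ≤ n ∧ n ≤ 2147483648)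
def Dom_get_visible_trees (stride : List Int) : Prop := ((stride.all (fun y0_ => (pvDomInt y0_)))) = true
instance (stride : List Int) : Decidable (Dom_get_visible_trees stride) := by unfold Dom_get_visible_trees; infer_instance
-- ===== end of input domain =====

-- B replaces A's two stateful scans inserting into one shared set by precomputed
-- prefix/suffix maximum arrays and a single comprehension over all indices (alternative
-- decomposition, same cost). Both functions return a Python set; set iteration order is
-- not modelled (see PYSEM.md), so both ports return the canonical sorted list of the
-- set's distinct elements.

-- ===== PORT A =====
-- the body of both of A's loops: 'if stride[idx] > current_max: visible.add(idx); current_max = stride[idx]'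
def pvStepA (stride : List Int) (acc : PySem.Set Int × Int) (idx : Int) : PySem.Set Int × Int :=
  if PySem.List.pyGetD stride idx 0 > acc.2
  then (PySem.Set.add acc.1 idx, PySem.List.pyGetD stride idx 0)
  else acc

def get_visible_trees (stride : List Int) : List Int :=
  let n := PySem.List.len stride
  let visible_trees : PySem.Set Int := PySem.Set.add (PySem.Set.add PySem.Set.empty 0) (n - 1)
  -- current_max is initialised from the first element; first loop
  let s1 := (PySem.List.pyRange 1 n 1).foldl (pvStepA stride) (visible_trees, PySem.List.pyGetD stride 0 0)
  -- current_max = stride[-1]; second loop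
  let s2 := (PySem.List.pyRange (n - 2) (-1) (-1)).foldl (pvStepA stride) (s1.1, PySem.List.pyGetD stride (-1) 0)
  PySem.List.sorted s2.1 (fun x => x) false

-- ===== PORT B =====
-- 'if best is None or x > best: best = x'
def pvBump (m : Option Int) (x : Int) : Option Int :=
  match m with
  | none => some x
  | some b => if x > b then some x else some b

-- the scan 'for x in l: out.append(best); if best is None or x > best: best = x'
def pvScanMax (l : List Int) : List (Option Int) :=
  (l.foldl (fun (acc : List (Option Int) × Option Int) x => (acc.1 ++ [acc.2], pvBump acc.2 x)) ([], none)).1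

-- 'm is None or x > m'
def pvBeats (x : Int) (m : Option Int) : Bool :=
  match m with
  | none => true
  | some b => x > b

def get_visible_trees_alt (stride : List Int) : List Int :=
  let pre := pvScanMax stride
  let suf := (pvScanMax stride.reverse).reverse
  let s : PySem.Set Int := PySem.Set.ofList
    ((PySem.List.pyRange 0 (PySem.List.len stride) 1).filter (fun i =>
      pvBeats (PySem.List.pyGetD stride i 0) (PySem.List.pyGetD pre i none) ||
      pvBeats (PySem.List.pyGetD stride i 0) (PySem.List.pyGetD suf i none)))
  PySem.List.sorted s (fun x => x) false

-- ===== PRECONDITION & SPEC =====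
-- A reads the first element before looping, which raises IndexError on the empty list; Pre_ excludes exactly that input.
def Pre_get_visible_trees (stride : List Int) : Prop := stride ≠ []
instance (stride : List Int) : Decidable (Pre_get_visible_trees stride) := by unfold Pre_get_visible_trees; infer_instance
def pvWitness_get_visible_trees : List Int := [3, 1, 2]

def Spec_get_visible_trees (stride : List Int) (out : List Int) : Prop := out = get_visible_trees_alt stride
instance (stride : List Int) (out : List Int) : Decidable (Spec_get_visible_trees stride out) := by unfold Spec_get_visible_trees; infer_instance

-- ===== CLAIM (what is proved, stated in full; the proofs are below) =====
def Claim_equal_get_visible_trees : Prop := ∀ (stride : List Int), Dom_get_visible_trees stride → Pre_get_visible_trees stride → Spec_get_visible_trees stride (get_visible_trees stride)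

-- ===== LEMMAS AND PROOFS =====

-- visibility from the left / from the right, the common characterisation
def pvVisL (stride : List Int) (k : Nat) : Prop := ∀ y ∈ stride.take k, y < stride.getD k 0
def pvVisR (stride : List Int) (k : Nat) : Prop := ∀ y ∈ stride.drop (k + 1), y < stride.getD k 0

-- running maxima as seen by A's two loops
def pvPMax (stride : List Int) (m : Nat) : Int := ((stride.drop 1).take m).foldl max (stride.getD 0 0)
def pvSMax (stride : List Int) (u : Nat) : Int := (stride.drop (u + 1)).foldl max (stride.getD u 0)

-- running maximum as seen by B's scan
def pvOMax (t : List Int) : Option Int := t.foldl pvBump none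

theorem pv_scan_pair (l : List Int) :
    l.foldl (fun (acc : List (Option Int) × Option Int) x => (acc.1 ++ [acc.2], pvBump acc.2 x)) ([], none)
      = ((List.range l.length).map (fun k => pvOMax (l.take k)), pvOMax l) := by
  induction l using List.reverseRecOn with
  | nil => simp [pvOMax]
  | append_singleton l x ih =>
      rw [List.foldl_append, ih]
      simp only [List.foldl_cons, List.foldl_nil]
      simp only [Prod.mk.injEq]
      constructor
      · rw [List.length_append, List.length_singleton, List.range_succ, List.map_append]
        congr 1
        · apply List.map_congr_left
          intro k hk
          rw [List.take_append_of_le_length (by simpa using (List.mem_range.mp hk).le)]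
        · simp [pvOMax]
      · simp [pvOMax]

theorem pv_beats_bump (x y : Int) (m : Option Int) :
    pvBeats x (pvBump m y) = true ↔ (pvBeats x m = true ∧ y < x) := by
  cases m with
  | none => simp [pvBeats, pvBump]
  | some b =>
      simp only [pvBeats, pvBump]
      split_ifs with h <;> simp <;> omega

theorem pv_beats_foldl (x : Int) (t : List Int) : ∀ m,
    pvBeats x (t.foldl pvBump m) = true ↔ (pvBeats x m = true ∧ ∀ y ∈ t, y < x) := by
  induction t with
  | nil => simp
  | cons y t ih =>
      intro m
      rw [List.foldl_cons, ih, pv_beats_bump]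
      constructor
      · rintro ⟨⟨h1, h2⟩, h3⟩
        exact ⟨h1, by simpa using ⟨h2, h3⟩⟩
      · rintro ⟨h1, h2⟩
        exact ⟨⟨h1, h2 y (by simp)⟩, fun z hz => h2 z (by simp [hz])⟩

theorem pv_beats_omax (x : Int) (t : List Int) :
    pvBeats x (pvOMax t) = true ↔ ∀ y ∈ t, y < x := by
  rw [pvOMax, pv_beats_foldl]
  simp [pvBeats]

theorem pv_gt_foldl_max (l : List Int) : ∀ a x : Int,
    (l.foldl max a < x) ↔ (a < x ∧ ∀ y ∈ l, y < x) := by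
  induction l with
  | nil => simp
  | cons y t ih =>
      intro a x
      rw [List.foldl_cons, ih]
      constructor
      · rintro ⟨h1, h2⟩
        refine ⟨lt_of_le_of_lt (le_max_left _ _) h1, ?_⟩
        intro z hz
        rcases List.mem_cons.mp hz with rfl | hz
        · exact lt_of_le_of_lt (le_max_right _ _) h1
        · exact h2 z hz
      · rintro ⟨h1, h2⟩
        exact ⟨max_lt h1 (h2 y (by simp)), fun z hz => h2 z (by simp [hz])⟩

theorem pv_foldl_max_seed (l : List Int) : ∀ a b : Int,
    l.foldl max (max a b) = max a (l.foldl max b) := by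
  induction l with
  | nil => simp
  | cons y t ih =>
      intro a b
      rw [List.foldl_cons, List.foldl_cons, max_assoc, ih]

theorem pv_pmax_succ (stride : List Int) (m : Nat) (h : m + 1 < stride.length) :
    pvPMax stride (m + 1) = max (pvPMax stride m) (stride.getD (m + 1) 0) := by
  unfold pvPMax
  have hm : m < (stride.drop 1).length := by simp; omega
  rw [List.take_add_one, List.getElem?_eq_getElem hm]
  simp only [Option.toList_some]
  rw [List.foldl_append]
  simp only [List.foldl_cons, List.foldl_nil]
  congr 1
  rw [List.getElem_drop, List.getD_eq_getElem stride 0 (by omega)]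
  congr 1
  omega

theorem pv_guard_left (stride : List Int) (h : stride ≠ []) (m : Nat) :
    (pvPMax stride m < stride.getD (m + 1) 0) ↔ pvVisL stride (m + 1) := by
  obtain ⟨x, rest, rfl⟩ : ∃ x rest, stride = x :: rest := by
    cases stride with
    | nil => exact absurd rfl h
    | cons x rest => exact ⟨x, rest, rfl⟩
  unfold pvPMax pvVisL
  rw [pv_gt_foldl_max]
  simp [List.take_succ_cons]

theorem pv_smax_succ (stride : List Int) (u : Nat) (h : u + 1 < stride.length) :
    pvSMax stride u = max (stride.getD u 0) (pvSMax stride (u + 1)) := by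
  unfold pvSMax
  rw [List.drop_eq_getElem_cons h]
  simp only [List.foldl_cons]
  rw [show max (stride.getD u 0) stride[u+1] = max (stride.getD u 0) (stride.getD (u+1) 0) by
        rw [List.getD_eq_getElem stride 0 h],
      pv_foldl_max_seed]

theorem pv_guard_right (stride : List Int) (u : Nat) (h : u + 1 < stride.length) :
    (pvSMax stride (u + 1) < stride.getD u 0) ↔ pvVisR stride u := by
  unfold pvSMax pvVisR
  rw [pv_gt_foldl_max, List.drop_eq_getElem_cons h]
  simp only [List.mem_cons]
  constructor
  · rintro ⟨h1, h2⟩ y hy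
    rcases hy with rfl | hy
    · rwa [← List.getD_eq_getElem stride 0 h]
    · exact h2 y hy
  · rintro hall
    refine ⟨?_, fun y hy => hall y (Or.inr hy)⟩
    rw [List.getD_eq_getElem stride 0 h]
    exact hall _ (Or.inl rfl)

theorem pv_left_loop (stride : List Int) (h : stride ≠ []) (s0 : PySem.Set Int) (h0 : s0.Nodup) :
    ∀ m : Nat, m ≤ stride.length - 1 →
    (let st := ((List.range m).map (fun k => (1 : Int) + ↑k)).foldl (pvStepA stride) (s0, stride.getD 0 0)
     st.2 = pvPMax stride m ∧ st.1.Nodup ∧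
       ∀ j : Int, j ∈ st.1 ↔ (j ∈ s0 ∨ ∃ k : Nat, 1 ≤ k ∧ k ≤ m ∧ pvVisL stride k ∧ j = ↑k)) := by
  have hlen : 1 ≤ stride.length := List.length_pos_iff.mpr h
  intro m
  induction m with
  | zero =>
      intro _
      refine ⟨by simp [pvPMax], h0, fun j => ?_⟩
      simp only [List.range_zero, List.map_nil, List.foldl_nil]
      constructor
      · exact Or.inl
      · rintro (hj | ⟨k, hk1, hk2, _, _⟩)
        · exact hj
        · omega
  | succ m ih =>
      intro hm
      have hm' : m ≤ stride.length - 1 := by omega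
      have hmm : m + 1 < stride.length := by omega
      obtain ⟨hc, hnd, hmem⟩ := ih hm'
      rw [List.range_succ, List.map_append, List.foldl_append]
      simp only [List.map_cons, List.map_nil, List.foldl_cons, List.foldl_nil]
      set st := ((List.range m).map (fun k => (1 : Int) + ↑k)).foldl (pvStepA stride) (s0, stride.getD 0 0) with hst
      have hidx : (1 : Int) + ↑m = ((m + 1 : Nat) : Int) := by push_cast; ring
      have hget : PySem.List.pyGetD stride (1 + ↑m) 0 = stride.getD (m + 1) 0 := by
        rw [hidx, PySem.List.pyGetD_natCast]
      unfold pvStepA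
      rw [hget, hc]
      by_cases hg : pvPMax stride m < stride.getD (m + 1) 0
      · rw [if_pos hg]
        have hvis : pvVisL stride (m + 1) := (pv_guard_left stride h m).mp hg
        refine ⟨?_, PySem.Set.nodup_add _ _ hnd, fun j => ?_⟩
        · rw [pv_pmax_succ stride m hmm]
          simp only [max_eq_right (le_of_lt hg)]
        · rw [PySem.Set.mem_add, hmem]
          constructor
          · rintro ((hj | ⟨k, hk1, hk2, hk3, rfl⟩) | rfl)
            · exact Or.inl hj
            · exact Or.inr ⟨k, hk1, by omega, hk3, rfl⟩
            · exact Or.inr ⟨m + 1, by omega, le_refl _, hvis, hidx⟩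
          · rintro (hj | ⟨k, hk1, hk2, hk3, rfl⟩)
            · exact Or.inl (Or.inl hj)
            · rcases Nat.lt_or_ge k (m + 1) with hk | hk
              · exact Or.inl (Or.inr ⟨k, hk1, by omega, hk3, rfl⟩)
              · have : k = m + 1 := by omega
                subst this
                exact Or.inr hidx.symm
      · rw [if_neg hg]
        have hvis : ¬ pvVisL stride (m + 1) := fun hv => hg ((pv_guard_left stride h m).mpr hv)
        refine ⟨?_, hnd, fun j => ?_⟩
        · rw [hc, pv_pmax_succ stride m hmm]
          simp only [max_eq_left (not_lt.mp hg)]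
        · rw [hmem]
          constructor
          · rintro (hj | ⟨k, hk1, hk2, hk3, rfl⟩)
            · exact Or.inl hj
            · exact Or.inr ⟨k, hk1, by omega, hk3, rfl⟩
          · rintro (hj | ⟨k, hk1, hk2, hk3, rfl⟩)
            · exact Or.inl hj
            · rcases Nat.lt_or_ge k (m + 1) with hk | hk
              · exact Or.inr ⟨k, hk1, by omega, hk3, rfl⟩
              · have : k = m + 1 := by omega
                subst this
                exact absurd hk3 hvis

theorem pv_right_loop (stride : List Int) :
    ∀ u : Nat, u ≤ stride.length - 1 → ∀ (s0 : PySem.Set Int), s0.Nodup →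
    (let st := (PySem.List.pyRange (↑u - 1) (-1) (-1)).foldl (pvStepA stride) (s0, pvSMax stride u)
     st.1.Nodup ∧
       ∀ j : Int, j ∈ st.1 ↔ (j ∈ s0 ∨ ∃ k : Nat, k < u ∧ pvVisR stride k ∧ j = ↑k)) := by
  intro u
  induction u with
  | zero =>
      intro _ s0 h0
      rw [show ((0 : Nat) : Int) - 1 = -1 by norm_num, PySem.List.pyRange_neg_one_eq_nil (le_refl _)]
      refine ⟨h0, fun j => ?_⟩
      simp only [List.foldl_nil]
      constructor
      · exact Or.inl
      · rintro (hj | ⟨k, hk, _, _⟩)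
        · exact hj
        · omega
  | succ u ih =>
      intro hu s0 h0
      have huu : u + 1 < stride.length := by omega
      have hu' : u ≤ stride.length - 1 := by omega
      rw [show ((u + 1 : Nat) : Int) - 1 = (u : Int) by push_cast; ring,
          PySem.List.pyRange_neg_one_cons (by omega)]
      simp only [List.foldl_cons]
      have hget : PySem.List.pyGetD stride (u : Int) 0 = stride.getD u 0 := PySem.List.pyGetD_natCast _ _ _
      by_cases hg : pvSMax stride (u + 1) < stride.getD u 0
      · have hvis : pvVisR stride u := (pv_guard_right stride u huu).mp hg
        have hc : stride.getD u 0 = pvSMax stride u := by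
          rw [pv_smax_succ stride u huu, max_eq_left (le_of_lt hg)]
        have hstep : pvStepA stride (s0, pvSMax stride (u + 1)) ↑u = (PySem.Set.add s0 ↑u, pvSMax stride u) := by
          simp only [pvStepA, hget]
          rw [if_pos hg, hc]
        rw [hstep]
        obtain ⟨hnd, hmem⟩ := ih hu' (PySem.Set.add s0 ↑u) (PySem.Set.nodup_add _ _ h0)
        refine ⟨hnd, fun j => ?_⟩
        rw [hmem]
        constructor
        · rintro (hj | ⟨k, hk1, hk2, rfl⟩)
          · rw [PySem.Set.mem_add] at hj
            rcases hj with hj | rfl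
            · exact Or.inl hj
            · exact Or.inr ⟨u, by omega, hvis, rfl⟩
          · exact Or.inr ⟨k, by omega, hk2, rfl⟩
        · rintro (hj | ⟨k, hk1, hk2, rfl⟩)
          · exact Or.inl (by rw [PySem.Set.mem_add]; exact Or.inl hj)
          · rcases Nat.lt_or_ge k u with hk | hk
            · exact Or.inr ⟨k, hk, hk2, rfl⟩
            · have : k = u := by omega
              subst this
              exact Or.inl (by rw [PySem.Set.mem_add]; exact Or.inr rfl)
      · have hvis : ¬ pvVisR stride u := fun hv => hg ((pv_guard_right stride u huu).mpr hv)
        have hc : pvSMax stride (u + 1) = pvSMax stride u := by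
          rw [pv_smax_succ stride u huu, max_eq_right (not_lt.mp hg)]
        have hstep : pvStepA stride (s0, pvSMax stride (u + 1)) ↑u = (s0, pvSMax stride u) := by
          simp only [pvStepA, hget]
          rw [if_neg hg, hc]
        rw [hstep]
        obtain ⟨hnd, hmem⟩ := ih hu' s0 h0
        refine ⟨hnd, fun j => ?_⟩
        rw [hmem]
        constructor
        · rintro (hj | ⟨k, hk1, hk2, rfl⟩)
          · exact Or.inl hj
          · exact Or.inr ⟨k, by omega, hk2, rfl⟩
        · rintro (hj | ⟨k, hk1, hk2, rfl⟩)
          · exact Or.inl hj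
          · rcases Nat.lt_or_ge k u with hk | hk
            · exact Or.inr ⟨k, hk, hk2, rfl⟩
            · have : k = u := by omega
              subst this
              exact absurd hk2 hvis

theorem pv_mem_A (stride : List Int) (h : stride ≠ []) :
    ∃ raw : PySem.Set Int, get_visible_trees stride = PySem.List.sorted raw (fun x => x) false ∧ raw.Nodup ∧
      ∀ j : Int, j ∈ raw ↔ (j = 0 ∨ j = ↑stride.length - 1 ∨
        (∃ k : Nat, 1 ≤ k ∧ k ≤ stride.length - 1 ∧ pvVisL stride k ∧ j = ↑k) ∨
        (∃ k : Nat, k < stride.length - 1 ∧ pvVisR stride k ∧ j = ↑k)) := by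
  have hlen : 1 ≤ stride.length := List.length_pos_iff.mpr h
  have hs0 : (PySem.Set.add (PySem.Set.add PySem.Set.empty 0) ((PySem.List.len stride) - 1)).Nodup :=
    PySem.Set.nodup_add _ _ (PySem.Set.nodup_add _ _ List.nodup_nil)
  have hR1 : PySem.List.pyRange 1 (PySem.List.len stride) 1
      = (List.range (stride.length - 1)).map (fun k => (1 : Int) + ↑k) := by
    rw [PySem.List.len_eq, PySem.List.pyRange_one]
    congr 2
    omega
  have hg0 : PySem.List.pyGetD stride 0 0 = stride.getD 0 0 := PySem.List.pyGetD_zero stride 0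
  obtain ⟨hc1, hnd1, hmem1⟩ := pv_left_loop stride h _ hs0 (stride.length - 1) (le_refl _)
  have hR2 : (PySem.List.len stride) - 2 = ((stride.length - 1 : Nat) : Int) - 1 := by
    rw [PySem.List.len_eq]; omega
  have hLast : PySem.List.pyGetD stride (-1) 0 = pvSMax stride (stride.length - 1) := by
    rw [PySem.List.pyGetD_neg_one stride 0 h]
    unfold pvSMax
    rw [show stride.length - 1 + 1 = stride.length from by omega, List.drop_length]
    simp only [List.foldl_nil]
    rw [List.getLast_eq_getElem, List.getD_eq_getElem stride 0 (by omega)]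
  obtain ⟨hnd2, hmem2⟩ := pv_right_loop stride (stride.length - 1) (le_refl _) _ hnd1
  refine ⟨((PySem.List.pyRange ((PySem.List.len stride) - 2) (-1) (-1)).foldl (pvStepA stride)
      (((PySem.List.pyRange 1 (PySem.List.len stride) 1).foldl (pvStepA stride)
        (PySem.Set.add (PySem.Set.add PySem.Set.empty 0) ((PySem.List.len stride) - 1),
         PySem.List.pyGetD stride 0 0)).1, PySem.List.pyGetD stride (-1) 0)).1, rfl, ?_, ?_⟩
  · rw [hR1, hg0, hR2, hLast]
    exact hnd2
  · intro j
    rw [hR1, hg0, hR2, hLast, hmem2 j, hmem1 j]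
    rw [PySem.Set.mem_add, PySem.Set.mem_add, PySem.List.len_eq]
    simp only [PySem.Set.empty, List.not_mem_nil, false_or]
    simp only [or_assoc]

theorem pv_pred_iff (stride : List Int) (k : Nat) (hkn : k < stride.length) :
    ((pvBeats (PySem.List.pyGetD stride (↑k) 0) (PySem.List.pyGetD (pvScanMax stride) (↑k) none) ||
      pvBeats (PySem.List.pyGetD stride (↑k) 0) (PySem.List.pyGetD (pvScanMax stride.reverse).reverse (↑k) none)) = true)
    ↔ (pvVisL stride k ∨ pvVisR stride k) := by
  have hx : PySem.List.pyGetD stride (↑k) 0 = stride.getD k 0 := PySem.List.pyGetD_natCast _ _ _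
  have hpre : PySem.List.pyGetD (pvScanMax stride) (↑k) none = pvOMax (stride.take k) := by
    rw [PySem.List.pyGetD_natCast]
    unfold pvScanMax
    rw [pv_scan_pair, PySem.List.getD_map_range _ _ _ _ hkn]
  have hlen' : (pvScanMax stride.reverse).length = stride.length := by
    unfold pvScanMax
    rw [pv_scan_pair]
    simp
  have hsuf : PySem.List.pyGetD (pvScanMax stride.reverse).reverse (↑k) none
      = pvOMax (stride.reverse.take (stride.length - 1 - k)) := by
    rw [PySem.List.pyGetD_natCast]
    have hk' : k < (pvScanMax stride.reverse).length := by omega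
    rw [congrFun (List.getD_reverse k hk') none, hlen']
    unfold pvScanMax
    rw [pv_scan_pair, PySem.List.getD_map_range _ _ _ _ (by simp; omega)]
  have htake : stride.reverse.take (stride.length - 1 - k) = (stride.drop (k + 1)).reverse := by
    rw [List.reverse_drop]
    congr 1
    omega
  rw [Bool.or_eq_true, hx, hpre, hsuf, htake, pv_beats_omax, pv_beats_omax]
  unfold pvVisL pvVisR
  constructor
  · rintro (hl | hr)
    · exact Or.inl hl
    · exact Or.inr (fun y hy => hr y (List.mem_reverse.mpr hy))
  · rintro (hl | hr)
    · exact Or.inl hl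
    · exact Or.inr (fun y hy => hr y (List.mem_reverse.mp hy))

theorem pv_mem_B (stride : List Int) :
    ∃ raw : PySem.Set Int, get_visible_trees_alt stride = PySem.List.sorted raw (fun x => x) false ∧ raw.Nodup ∧
      ∀ j : Int, j ∈ raw ↔ ∃ k : Nat, k < stride.length ∧ (pvVisL stride k ∨ pvVisR stride k) ∧ j = ↑k := by
  refine ⟨_, rfl, PySem.Set.nodup_ofList _, ?_⟩
  intro j
  rw [PySem.Set.mem_ofList]
  rw [PySem.List.len_eq, PySem.List.pyRange_zero_nat, List.filter_map, List.mem_map]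
  constructor
  · rintro ⟨k, hk, rfl⟩
    rw [List.mem_filter, List.mem_range] at hk
    obtain ⟨hkn, hq⟩ := hk
    simp only [Function.comp_apply] at hq
    exact ⟨k, hkn, (pv_pred_iff stride k hkn).mp hq, rfl⟩
  · rintro ⟨k, hkn, hv, rfl⟩
    refine ⟨k, ?_, rfl⟩
    rw [List.mem_filter, List.mem_range]
    exact ⟨hkn, by simpa using (pv_pred_iff stride k hkn).mpr hv⟩

-- ===== VERDICT (by name: the statement is the Claim_ definition above) =====
theorem get_visible_trees_spec : Claim_equal_get_visible_trees := by
  intro stride _ hpre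
  unfold Spec_get_visible_trees
  have hlen : 1 ≤ stride.length := List.length_pos_iff.mpr hpre
  obtain ⟨ra, ha, hnda, hma⟩ := pv_mem_A stride hpre
  obtain ⟨rb, hb, hndb, hmb⟩ := pv_mem_B stride
  rw [ha, hb, PySem.List.sorted_id_eq_sorted_id_iff_perm]
  rw [List.perm_ext_iff_of_nodup hnda hndb]
  intro j
  rw [hma j, hmb j]
  constructor
  · rintro (rfl | rfl | ⟨k, hk1, hk2, hv, rfl⟩ | ⟨k, hk, hv, rfl⟩)
    · exact ⟨0, by omega, Or.inl (by intro y hy; simp at hy), rfl⟩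
    · refine ⟨stride.length - 1, by omega, Or.inr ?_, by omega⟩
      intro y hy
      rw [show stride.length - 1 + 1 = stride.length from by omega, List.drop_length] at hy
      simp at hy
    · exact ⟨k, by omega, Or.inl hv, rfl⟩
    · exact ⟨k, by omega, Or.inr hv, rfl⟩
  · rintro ⟨k, hk, hv, rfl⟩
    by_cases hk0 : k = 0
    · subst hk0
      exact Or.inl rfl
    · by_cases hkl : k = stride.length - 1
      · subst hkl
        exact Or.inr (Or.inl (by omega))
      · rcases hv with hv | hv
        · exact Or.inr (Or.inr (Or.inl ⟨k, by omega, by omega, hv, rfl⟩))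
        · exact Or.inr (Or.inr (Or.inr ⟨k, by omega, hv, rfl⟩))
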